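-- pv_equiv track=rewrite | github.com/ZeyuPing/SYSU_AI_LAB | Lab3_Codes/utils/parse.py | Parse_for_FOL
-- ===== SOURCE A (Python) =====
-- def split_literals(clause_str):
--     """
--     拆分字面量，确保谓词内部的逗号不被拆分
--     """
--     literals = []
--     current = ""
--     paren_count = 0
--     for char in clause_str:
--         if char == '(':
--             paren_count += 1
--             current += char
--         elif char == ')':
--             paren_count -= 1
--             current += char
--         elif char == ',' and paren_count == 0:
--             if current.strip():
--                 literals.append(current.strip())
--             current = ""
--         else:
--             current += char
--     if current.strip():
--         literals.append(current.strip())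
--     return literals
--
-- def Parse_for_FOL(KB):
--     """
--     改进版解析函数，能够正确处理谓词内部逗号。
--     返回：set[tuple[str]]
--     """
--     kb_str = KB.strip()
--     if kb_str[0] == '{' and kb_str[-1] == '}':
--         kb_str = kb_str[1:-1].strip()
--     clauses = []
--     current_clause = ""
--     paren_count = 0
--     for char in kb_str:
--         if char == '(':
--             if paren_count == 0:
--                 current_clause = ""
--             else:
--                 current_clause += char
--             paren_count += 1
--         elif char == ')':
--             paren_count -= 1
--             if paren_count == 0:
--                 clauses.append(current_clause.strip())
--                 current_clause = ""
--             else: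
--                 current_clause += char
--         else:
--             if paren_count > 0:
--                 current_clause += char
--     clause_set = set()
--     for clause in clauses:
--         if clause.endswith(','):
--             clause = clause[:-1].strip()
--         literals = split_literals(clause)
--         clause_set.add(tuple(literals))
--     return clause_set
-- ===== SOURCE B (Python) =====
-- def Parse_for_FOL(KB):
--     """Single-pass state machine over the KB string: one traversal with a paren
--     depth counter emits each clause's literal tuple directly (no intermediate
--     clause strings, no second splitting pass)."""
--     s = KB.strip()
--     if s[0] == '{' and s[-1] == '}':
--         s = s[1:-1].strip()
--     result = set()
--     d = 0
--     tokens = []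
--     t = ""
--     for ch in s:
--         if ch == '(':
--             if d == 0:
--                 tokens = []
--                 t = ""
--             elif d > 0:
--                 t += ch
--             d += 1
--         elif ch == ')':
--             d -= 1
--             if d == 0:
--                 t2 = t.rstrip()
--                 if t2.endswith(','):
--                     t = t2[:-1]
--                 if t.strip():
--                     tokens.append(t.strip())
--                 result.add(tuple(tokens))
--                 tokens = []
--                 t = ""
--             elif d > 0:
--                 t += ch
--         elif ch == ',' and d == 1:
--             if t.strip():
--                 tokens.append(t.strip())
--             t = ""
--         elif d > 0:
--             t += ch
--     return result
-- ===== Notes on version B (the rewrite author's own statement) =====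
-- stated objective: alternative
-- what changed: Replaced A's two-phase structure (first loop extracts clause strings, second pass re-splits each clause on top-level commas) by a single-pass state machine over the input that tracks paren depth and emits each clause's literal tuple directly, with no intermediate clause strings.
import Mathlib
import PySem

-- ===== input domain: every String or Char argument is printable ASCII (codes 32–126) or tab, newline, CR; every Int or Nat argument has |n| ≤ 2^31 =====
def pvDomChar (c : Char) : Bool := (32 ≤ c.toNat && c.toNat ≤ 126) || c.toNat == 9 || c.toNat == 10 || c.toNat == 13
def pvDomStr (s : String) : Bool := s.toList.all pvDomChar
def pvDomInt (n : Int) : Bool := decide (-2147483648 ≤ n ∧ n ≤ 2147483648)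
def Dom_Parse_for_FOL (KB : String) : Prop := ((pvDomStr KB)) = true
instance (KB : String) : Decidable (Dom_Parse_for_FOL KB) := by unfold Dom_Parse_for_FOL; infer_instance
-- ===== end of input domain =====

-- B fuses A's extract-clauses-then-resplit structure into one single-pass state
-- machine that emits each clause's literal tuple directly (objective: alternative;
-- same asymptotic cost, one traversal instead of two phases).

-- ===== PORT A =====
-- helper split_literals: loop body (state = (literals, current, paren_count))
def pvSplitStep (st : List (List Char) × List Char × Int) (c : Char) :
    List (List Char) × List Char × Int :=
  if c = '(' then (st.1, st.2.1 ++ [c], st.2.2 + 1)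
  else if c = ')' then (st.1, st.2.1 ++ [c], st.2.2 - 1)
  else if c = ',' ∧ st.2.2 = 0 then
    (if PySem.Chars.strip st.2.1 ≠ [] then st.1 ++ [PySem.Chars.strip st.2.1] else st.1,
     [], st.2.2)
  else (st.1, st.2.1 ++ [c], st.2.2)

-- split_literals(clause_str)
def pvSplitLiterals (clause : List Char) : List (List Char) :=
  let st := List.foldl pvSplitStep ([], [], 0) clause
  if PySem.Chars.strip st.2.1 ≠ [] then st.1 ++ [PySem.Chars.strip st.2.1] else st.1

-- first loop of Parse_for_FOL: state = (clauses, current_clause, paren_count)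
def pvStepA (st : List (List Char) × List Char × Int) (c : Char) :
    List (List Char) × List Char × Int :=
  if c = '(' then
    if st.2.2 = 0 then (st.1, [], st.2.2 + 1) else (st.1, st.2.1 ++ [c], st.2.2 + 1)
  else if c = ')' then
    if st.2.2 - 1 = 0 then (st.1 ++ [PySem.Chars.strip st.2.1], [], st.2.2 - 1)
    else (st.1, st.2.1 ++ [c], st.2.2 - 1)
  else if 0 < st.2.2 then (st.1, st.2.1 ++ [c], st.2.2) else st

-- second loop body: trailing-comma fix (clause[:-1] is dropLast) then split_literals
def pvProcA (clause : List Char) : List (List Char) :=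
  pvSplitLiterals
    (if PySem.Chars.endswith clause [','] then PySem.Chars.strip clause.dropLast else clause)

-- kb_str = KB.strip(); brace removal (kb_str[0] / kb_str[-1]; on the empty string
-- Python raises IndexError — excluded by Pre_; the fallback value is arbitrary)
def pvPreA (KB : String) : List Char :=
  let kb0 := PySem.Chars.strip KB.toList
  match PySem.List.pyGet? kb0 (0 : Int), PySem.List.pyGet? kb0 (-1 : Int) with
  | some a, some b =>
      if a = '{' ∧ b = '}' then PySem.Chars.strip (PySem.List.slice kb0 (some 1) (some (-1)))
      else kb0
  | _, _ => kb0

def Parse_for_FOL (KB : String) : List (List String) :=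
  let st := List.foldl pvStepA ([], [], (0 : Int)) (pvPreA KB)
  st.1.foldl (fun s clause => PySem.Set.add s ((pvProcA clause).map String.ofList)) []

-- ===== PORT B =====
-- trailing-comma fix at clause end (t2 = t.rstrip(); if t2.endswith(','): t = t2[:-1])
def pvFix (t : List Char) : List Char :=
  if PySem.Chars.endswith (PySem.Chars.rstrip t) [','] then (PySem.Chars.rstrip t).dropLast else t

-- flush of the current token at clause end
def pvFlushTok (tok : List String) (t : List Char) : List String :=
  if PySem.Chars.strip (pvFix t) ≠ [] then tok ++ [String.ofList (PySem.Chars.strip (pvFix t))]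
  else tok

-- single-pass machine: state = (result, d, tokens, t)
def pvStepB (st : List (List String) × Int × List String × List Char) (c : Char) :
    List (List String) × Int × List String × List Char :=
  if c = '(' then
    if st.2.1 = 0 then (st.1, st.2.1 + 1, [], [])
    else if 0 < st.2.1 then (st.1, st.2.1 + 1, st.2.2.1, st.2.2.2 ++ [c])
    else (st.1, st.2.1 + 1, st.2.2.1, st.2.2.2)
  else if c = ')' then
    if st.2.1 - 1 = 0 then
      (PySem.Set.add st.1 (pvFlushTok st.2.2.1 st.2.2.2), st.2.1 - 1, [], [])
    else if 0 < st.2.1 - 1 then (st.1, st.2.1 - 1, st.2.2.1, st.2.2.2 ++ [c])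
    else (st.1, st.2.1 - 1, st.2.2.1, st.2.2.2)
  else if c = ',' ∧ st.2.1 = 1 then
    (st.1, st.2.1,
     (if PySem.Chars.strip st.2.2.2 ≠ [] then st.2.2.1 ++ [String.ofList (PySem.Chars.strip st.2.2.2)]
      else st.2.2.1), [])
  else if 0 < st.2.1 then (st.1, st.2.1, st.2.2.1, st.2.2.2 ++ [c])
  else st

-- same preprocessing lines as Source B (s = KB.strip(); brace removal)
def pvPreB (KB : String) : List Char :=
  let kb0 := PySem.Chars.strip KB.toList
  match PySem.List.pyGet? kb0 (0 : Int), PySem.List.pyGet? kb0 (-1 : Int) with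
  | some a, some b =>
      if a = '{' ∧ b = '}' then PySem.Chars.strip (PySem.List.slice kb0 (some 1) (some (-1)))
      else kb0
  | _, _ => kb0

def Parse_for_FOL_alt (KB : String) : List (List String) :=
  (List.foldl pvStepB ([], (0 : Int), [], []) (pvPreB KB)).1

-- ===== PRECONDITION & SPEC =====
-- Pre_ excludes exactly the inputs whose strip() is empty: there Python A raises
-- IndexError on kb_str[0].
def Pre_Parse_for_FOL (KB : String) : Prop := PySem.Chars.strip KB.toList ≠ []
instance (KB : String) : Decidable (Pre_Parse_for_FOL KB) := by
  unfold Pre_Parse_for_FOL; infer_instance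

def pvWitness_Parse_for_FOL : String := "{ (P(a,b), Q(x)) }"

def Spec_Parse_for_FOL (KB : String) (out : List (List String)) : Prop := out = Parse_for_FOL_alt KB
instance (KB : String) (out : List (List String)) : Decidable (Spec_Parse_for_FOL KB out) := by
  unfold Spec_Parse_for_FOL; infer_instance

-- ===== CLAIM (what is proved, stated in full; the proofs are below) =====
def Claim_equal_Parse_for_FOL : Prop :=
  ∀ (KB : String), Dom_Parse_for_FOL KB → Pre_Parse_for_FOL KB →
    Spec_Parse_for_FOL KB (Parse_for_FOL KB)

-- ===== LEMMAS AND PROOFS =====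

-- abbreviations used only by the proofs
def pvSF (cs : List Char) : List (List Char) × List Char × Int :=
  List.foldl pvSplitStep ([], [], 0) cs

def pvFinalL (t : List Char) : List (List Char) :=
  if PySem.Chars.strip (pvFix t) ≠ [] then [PySem.Chars.strip (pvFix t)] else []

def pvAll (cl : List (List Char)) : List (List String) :=
  cl.foldl (fun s clause => PySem.Set.add s ((pvProcA clause).map String.ofList)) []

def pvRun (st : List (List Char) × List Char × Int) (cs : List Char) : List (List Char) :=
  let r := List.foldl pvSplitStep st cs
  if PySem.Chars.strip r.2.1 ≠ [] then r.1 ++ [PySem.Chars.strip r.2.1] else r.1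

lemma pvFlushTok_eq (tok : List String) (t : List Char) :
    pvFlushTok tok t = tok ++ (pvFinalL t).map String.ofList := by
  unfold pvFlushTok pvFinalL
  split_ifs <;> simp

lemma pvAll_append (cl : List (List Char)) (x : List Char) :
    pvAll (cl ++ [x]) = PySem.Set.add (pvAll cl) ((pvProcA x).map String.ofList) := by
  unfold pvAll; rw [List.foldl_append]; rfl

lemma pv_ws_ne {c : Char} (h : PySem.Chars.isspace c = true) :
    c ≠ '(' ∧ c ≠ ')' ∧ c ≠ ',' := by
  refine ⟨?_, ?_, ?_⟩ <;> rintro rfl <;> revert h <;> decide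

lemma pv_wsfold (w : List Char) (hw : ∀ c ∈ w, PySem.Chars.isspace c = true)
    (L : List (List Char)) (T : List Char) (n : Int) :
    List.foldl pvSplitStep (L, T, n) w = (L, T ++ w, n) := by
  induction w generalizing T with
  | nil => simp
  | cons c w ih =>
    obtain ⟨h1, h2, h3⟩ := pv_ws_ne (hw c (List.mem_cons_self ..))
    have hstep : pvSplitStep (L, T, n) c = (L, T ++ [c], n) := by
      simp [pvSplitStep, h1, h2, h3]
    rw [List.foldl_cons, hstep, ih (fun c hc => hw c (List.mem_cons_of_mem _ hc))]
    simp

lemma pv_dropWhile_cons_false {p : Char → Bool} {l t : List Char} {a : Char}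
    (h : l.dropWhile p = a :: t) : p a = false := by
  induction l with
  | nil => simp at h
  | cons x xs ih =>
    rw [List.dropWhile_cons] at h
    split at h
    · exact ih h
    · next hx => cases h; simpa using hx

lemma pv_lstrip_ws_append {w : List Char} (hw : ∀ c ∈ w, PySem.Chars.isspace c = true)
    (x : List Char) : PySem.Chars.lstrip (w ++ x) = PySem.Chars.lstrip x := by
  unfold PySem.Chars.lstrip
  rw [List.dropWhile_append]
  have : List.dropWhile PySem.Chars.isspace w = [] := by
    rw [List.dropWhile_eq_nil_iff]; exact fun c hc => hw c hc
  simp [this]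

lemma pv_rstrip_append_ws {w : List Char} (hw : ∀ c ∈ w, PySem.Chars.isspace c = true)
    (x : List Char) : PySem.Chars.rstrip (x ++ w) = PySem.Chars.rstrip x := by
  unfold PySem.Chars.rstrip
  rw [List.reverse_append, List.dropWhile_append]
  have : List.dropWhile PySem.Chars.isspace w.reverse = [] := by
    rw [List.dropWhile_eq_nil_iff]; exact fun c hc => hw c (List.mem_reverse.mp hc)
  simp [this]

lemma pv_rstrip_ws {w : List Char} (hw : ∀ c ∈ w, PySem.Chars.isspace c = true) :
    PySem.Chars.rstrip w = [] := by
  have := pv_rstrip_append_ws hw []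
  simpa using this

lemma pv_rstrip_append_nonws {c : Char} (hc : PySem.Chars.isspace c = false)
    (x : List Char) : PySem.Chars.rstrip (x ++ [c]) = x ++ [c] := by
  unfold PySem.Chars.rstrip
  rw [List.reverse_append]
  simp [hc]

lemma pv_lstrip_concat_nonws {a : Char} (ha : PySem.Chars.isspace a = false)
    (ys : List Char) : PySem.Chars.lstrip (ys ++ [a]) = PySem.Chars.lstrip ys ++ [a] := by
  unfold PySem.Chars.lstrip
  rw [List.dropWhile_append]
  split
  · next h =>
    rw [List.isEmpty_iff] at h
    rw [h, List.dropWhile_cons]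
    simp [ha]
  · rfl

lemma pv_strip_append_ws {w : List Char} (hw : ∀ c ∈ w, PySem.Chars.isspace c = true)
    (x : List Char) : PySem.Chars.strip (x ++ w) = PySem.Chars.strip x := by
  unfold PySem.Chars.strip
  unfold PySem.Chars.lstrip
  rw [List.dropWhile_append]
  split
  · next h =>
    rw [List.isEmpty_iff] at h
    rw [show List.dropWhile PySem.Chars.isspace w = [] from
      (List.dropWhile_eq_nil_iff).mpr (fun c hc => hw c hc)]
    rw [h]
  · exact pv_rstrip_append_ws hw _

lemma pv_strip_ws_append {w : List Char} (hw : ∀ c ∈ w, PySem.Chars.isspace c = true)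
    (x : List Char) : PySem.Chars.strip (w ++ x) = PySem.Chars.strip x := by
  unfold PySem.Chars.strip
  rw [pv_lstrip_ws_append hw]

lemma pv_strip_ws {w : List Char} (hw : ∀ c ∈ w, PySem.Chars.isspace c = true) :
    PySem.Chars.strip w = [] := by
  have := pv_strip_ws_append hw []
  simpa using this

lemma pv_lstrip_idem (x : List Char) :
    PySem.Chars.lstrip (PySem.Chars.lstrip x) = PySem.Chars.lstrip x := by
  unfold PySem.Chars.lstrip
  exact List.dropWhile_idempotent _ _

lemma pv_strip_lstrip (x : List Char) :
    PySem.Chars.strip (PySem.Chars.lstrip x) = PySem.Chars.strip x := by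
  unfold PySem.Chars.strip
  rw [pv_lstrip_idem]

lemma pv_rstrip_decomp (cs : List Char) :
    ∃ w, (∀ c ∈ w, PySem.Chars.isspace c = true) ∧ cs = PySem.Chars.rstrip cs ++ w := by
  refine ⟨(List.takeWhile PySem.Chars.isspace cs.reverse).reverse, ?_, ?_⟩
  · intro c hc
    exact List.mem_takeWhile_imp (List.mem_reverse.mp hc)
  · unfold PySem.Chars.rstrip
    rw [← List.reverse_append, List.takeWhile_append_dropWhile, List.reverse_reverse]

lemma pv_rstrip_concat_nonws (cs ys : List Char) (a : Char)
    (h : PySem.Chars.rstrip cs = ys ++ [a]) : PySem.Chars.isspace a = false := by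
  unfold PySem.Chars.rstrip at h
  have h' : List.dropWhile PySem.Chars.isspace cs.reverse = a :: ys.reverse := by
    have := congrArg List.reverse h
    simpa using this
  exact pv_dropWhile_cons_false h'

lemma pv_endswith_concat (x : List Char) (a c : Char) :
    PySem.Chars.endswith (x ++ [a]) [c] = true ↔ a = c := by
  rw [PySem.Chars.endswith_iff]
  constructor
  · rintro ⟨t, ht⟩
    have := congrArg List.getLast? ht
    rw [List.getLast?_concat, List.getLast?_concat] at this
    exact (Option.some_inj.mp this).symm
  · rintro rfl
    exact List.suffix_append x [a]

lemma pv_endswith_nil (c : Char) : PySem.Chars.endswith [] [c] = false := by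
  apply Bool.eq_false_iff.mpr
  intro hc
  rw [PySem.Chars.endswith_iff] at hc
  simp at hc

-- EQW: a whitespace prefix of the current buffer never affects the split result
lemma pv_eqw (cs : List Char) :
    ∀ (L : List (List Char)) (T : List Char) (n : Int) (w : List Char),
      (∀ c ∈ w, PySem.Chars.isspace c = true) →
      pvRun (L, w ++ T, n) cs = pvRun (L, T, n) cs := by
  induction cs with
  | nil =>
    intro L T n w hw
    unfold pvRun
    simp [pv_strip_ws_append hw]
  | cons c cs ih =>
    intro L T n w hw
    unfold pvRun
    rw [List.foldl_cons, List.foldl_cons]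
    by_cases h1 : c = '('
    · subst h1
      have e1 : pvSplitStep (L, w ++ T, n) '(' = (L, w ++ (T ++ ['(']), n + 1) := by
        simp [pvSplitStep]
      have e2 : pvSplitStep (L, T, n) '(' = (L, T ++ ['('], n + 1) := by
        simp [pvSplitStep]
      rw [e1, e2]
      exact ih L (T ++ ['(']) (n + 1) w hw
    by_cases h2 : c = ')'
    · subst h2
      have e1 : pvSplitStep (L, w ++ T, n) ')' = (L, w ++ (T ++ [')']), n - 1) := by
        simp [pvSplitStep]
      have e2 : pvSplitStep (L, T, n) ')' = (L, T ++ [')'], n - 1) := by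
        simp [pvSplitStep]
      rw [e1, e2]
      exact ih L (T ++ [')']) (n - 1) w hw
    by_cases h3 : c = ',' ∧ n = 0
    · obtain ⟨rfl, rfl⟩ := h3
      have e1 : pvSplitStep (L, w ++ T, 0) ',' =
          (if PySem.Chars.strip (w ++ T) ≠ [] then L ++ [PySem.Chars.strip (w ++ T)] else L,
           [], 0) := by
        simp [pvSplitStep]
      have e2 : pvSplitStep (L, T, 0) ',' =
          (if PySem.Chars.strip T ≠ [] then L ++ [PySem.Chars.strip T] else L, [], 0) := by
        simp [pvSplitStep]
      rw [e1, e2, pv_strip_ws_append hw]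
    · have e1 : pvSplitStep (L, w ++ T, n) c = (L, w ++ (T ++ [c]), n) := by
        simp [pvSplitStep, h1, h2, h3]
      have e2 : pvSplitStep (L, T, n) c = (L, T ++ [c], n) := by
        simp [pvSplitStep, h1, h2, h3]
      rw [e1, e2]
      exact ih L (T ++ [c]) n w hw

lemma pv_splitlits_eq_run (cs : List Char) : pvSplitLiterals cs = pvRun ([], [], 0) cs := rfl

lemma pv_splitlits_lstrip (cs : List Char) :
    pvSplitLiterals (PySem.Chars.lstrip cs) = pvSplitLiterals cs := by
  have hdec : List.takeWhile PySem.Chars.isspace cs ++ PySem.Chars.lstrip cs = cs :=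
    List.takeWhile_append_dropWhile
  have hw : ∀ c ∈ List.takeWhile PySem.Chars.isspace cs, PySem.Chars.isspace c = true :=
    fun c hc => List.mem_takeWhile_imp hc
  conv_rhs => rw [← hdec]
  rw [pv_splitlits_eq_run, pv_splitlits_eq_run]
  unfold pvRun
  rw [List.foldl_append, pv_wsfold _ hw]
  have : pvRun ([], List.takeWhile PySem.Chars.isspace cs, 0) (PySem.Chars.lstrip cs) =
      pvRun ([], [], 0) (PySem.Chars.lstrip cs) := by
    have := pv_eqw (PySem.Chars.lstrip cs) [] [] 0 (List.takeWhile PySem.Chars.isspace cs) hw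
    simpa using this
  unfold pvRun at this
  simpa using this.symm

lemma pv_splitlits_rstrip (cs : List Char) :
    pvSplitLiterals (PySem.Chars.rstrip cs) = pvSplitLiterals cs := by
  obtain ⟨w, hw, hdec⟩ := pv_rstrip_decomp cs
  conv_rhs => rw [hdec]
  rw [pv_splitlits_eq_run, pv_splitlits_eq_run]
  unfold pvRun
  rw [List.foldl_append]
  rcases hst : List.foldl pvSplitStep ([], [], 0) (PySem.Chars.rstrip cs) with ⟨L, T, n⟩
  rw [pv_wsfold _ hw]
  simp [pv_strip_append_ws hw]

lemma pv_splitlits_strip (x : List Char) :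
    pvSplitLiterals (PySem.Chars.strip x) = pvSplitLiterals x := by
  unfold PySem.Chars.strip
  rw [pv_splitlits_rstrip, pv_splitlits_lstrip]

lemma pv_step_ne_comma (L : List (List Char)) (T : List Char) (n : Int) {c : Char}
    (h : c ≠ ',') : ∃ m, pvSplitStep (L, T, n) c = (L, T ++ [c], m) := by
  by_cases g1 : c = '('
  · subst g1; exact ⟨n + 1, by simp [pvSplitStep]⟩
  by_cases g2 : c = ')'
  · subst g2; exact ⟨n - 1, by simp [pvSplitStep]⟩
  · exact ⟨n, by simp [pvSplitStep, g1, g2, h]⟩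

-- FLUSH: A's per-clause processing of the stripped buffer equals B's token flush
lemma pv_flush_eq (cs : List Char) :
    pvProcA (PySem.Chars.strip cs) = (pvSF cs).1 ++ pvFinalL (pvSF cs).2.1 := by
  obtain ⟨w, hw, hdec⟩ := pv_rstrip_decomp cs
  have hsf : pvSF cs = ((pvSF (PySem.Chars.rstrip cs)).1,
      (pvSF (PySem.Chars.rstrip cs)).2.1 ++ w, (pvSF (PySem.Chars.rstrip cs)).2.2) := by
    conv_lhs => rw [show cs = PySem.Chars.rstrip cs ++ w from hdec]
    unfold pvSF
    rw [List.foldl_append]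
    rcases List.foldl pvSplitStep ([], [], 0) (PySem.Chars.rstrip cs) with ⟨L, T, n⟩
    rw [pv_wsfold _ hw]
  have hstrip : PySem.Chars.strip cs = PySem.Chars.strip (PySem.Chars.rstrip cs) := by
    conv_lhs => rw [show cs = PySem.Chars.rstrip cs ++ w from hdec]
    exact pv_strip_append_ws hw _
  have hfinw : pvFinalL w = [] := by
    unfold pvFinalL pvFix
    rw [pv_rstrip_ws hw, pv_endswith_nil]
    simp [pv_strip_ws hw]
  rcases List.eq_nil_or_concat (PySem.Chars.rstrip cs) with hnil | ⟨ys, a, hcat⟩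
  · -- stripped body empty: everything is whitespace
    have hstrip0 : PySem.Chars.strip cs = [] := by
      rw [hstrip, hnil]; decide
    have hprocA : pvProcA [] = [] := by decide
    have h1 : (pvSF cs).1 = [] := by rw [hsf, hnil]; rfl
    have h2 : (pvSF cs).2.1 = [] ++ w := by rw [hsf, hnil]; rfl
    rw [hstrip0, hprocA, h1, h2, List.nil_append, List.nil_append, hfinw]
  · rw [List.concat_eq_append] at hcat
    have ha : PySem.Chars.isspace a = false := pv_rstrip_concat_nonws cs ys a hcat
    have hstrip2 : PySem.Chars.strip (PySem.Chars.rstrip cs) = PySem.Chars.lstrip ys ++ [a] := by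
      rw [hcat]
      unfold PySem.Chars.strip
      rw [pv_lstrip_concat_nonws ha, pv_rstrip_append_nonws ha]
    have hsfb : pvSF (PySem.Chars.rstrip cs) = pvSplitStep (pvSF ys) a := by
      rw [hcat]; unfold pvSF; rw [List.foldl_append]; rfl
    rcases hys : pvSF ys with ⟨L', T', n'⟩
    by_cases hac : a = ','
    · subst hac
      -- A side: trailing comma is removed, then the stripped remainder is split
      have hA : pvProcA (PySem.Chars.strip cs) = pvSplitLiterals ys := by
        unfold pvProcA
        rw [hstrip, hstrip2]
        rw [if_pos ((pv_endswith_concat _ _ _).mpr rfl)]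
        rw [List.dropLast_concat, pv_strip_lstrip, pv_splitlits_strip]
      rw [hA]
      by_cases hn : n' = 0
      · subst hn
        have hb : pvSF (PySem.Chars.rstrip cs) =
            (if PySem.Chars.strip T' ≠ [] then L' ++ [PySem.Chars.strip T'] else L', [], 0) := by
          rw [hsfb, hys]; simp [pvSplitStep]
        have h1 : (pvSF cs).1 =
            if PySem.Chars.strip T' ≠ [] then L' ++ [PySem.Chars.strip T'] else L' := by
          rw [hsf, hb]
        have h2 : (pvSF cs).2.1 = [] ++ w := by rw [hsf, hb]
        rw [h1, h2, List.nil_append, hfinw, List.append_nil]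
        rw [pv_splitlits_eq_run]
        unfold pvRun
        rw [show List.foldl pvSplitStep ([], [], 0) ys = (L', T', 0) from hys]
      · have hb : pvSF (PySem.Chars.rstrip cs) = (L', T' ++ [','], n') := by
          rw [hsfb, hys]; simp [pvSplitStep, hn]
        have h1 : (pvSF cs).1 = L' := by rw [hsf, hb]
        have h2 : (pvSF cs).2.1 = (T' ++ [',']) ++ w := by rw [hsf, hb]
        have hfin : pvFinalL ((T' ++ [',']) ++ w) =
            if PySem.Chars.strip T' ≠ [] then [PySem.Chars.strip T'] else [] := by
          unfold pvFinalL pvFix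
          rw [pv_rstrip_append_ws hw, pv_rstrip_append_nonws (by decide)]
          rw [if_pos ((pv_endswith_concat _ _ _).mpr rfl)]
          rw [List.dropLast_concat]
        rw [h1, h2, hfin]
        rw [pv_splitlits_eq_run]
        unfold pvRun
        rw [show List.foldl pvSplitStep ([], [], 0) ys = (L', T', n') from hys]
        split_ifs <;> simp_all
    · -- last body char is not a comma: no trailing-comma fix on either side
      obtain ⟨m, hm⟩ := pv_step_ne_comma L' T' n' hac
      have hA : pvProcA (PySem.Chars.strip cs) = pvSplitLiterals (ys ++ [a]) := by
        unfold pvProcA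
        rw [hstrip, hstrip2]
        rw [if_neg (fun hc => hac ((pv_endswith_concat _ _ _).mp hc))]
        rw [← pv_lstrip_concat_nonws ha, pv_splitlits_lstrip]
      have hb : pvSF (PySem.Chars.rstrip cs) = (L', T' ++ [a], m) := by
        rw [hsfb, hys, hm]
      have h1 : (pvSF cs).1 = L' := by rw [hsf, hb]
      have h2 : (pvSF cs).2.1 = (T' ++ [a]) ++ w := by rw [hsf, hb]
      have hfin : pvFinalL ((T' ++ [a]) ++ w) =
          if PySem.Chars.strip (T' ++ [a]) ≠ [] then [PySem.Chars.strip (T' ++ [a])] else [] := by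
        unfold pvFinalL pvFix
        rw [pv_rstrip_append_ws hw, pv_rstrip_append_nonws ha]
        rw [if_neg (fun hc => hac ((pv_endswith_concat _ _ _).mp hc))]
        rw [pv_strip_append_ws hw]
      rw [hA, h1, h2, hfin]
      rw [pv_splitlits_eq_run]
      unfold pvRun
      rw [List.foldl_append,
        show List.foldl pvSplitStep ([], [], 0) ys = (L', T', n') from hys,
        show List.foldl pvSplitStep (L', T', n') [a] = pvSplitStep (L', T', n') a from rfl, hm]
      split_ifs <;> simp_all

-- the coupling invariant between A's first-loop state and B's machine state
def pvInv (sa : List (List Char) × List Char × Int)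
    (sb : List (List String) × Int × List String × List Char) : Prop :=
  sb.2.1 = sa.2.2 ∧ sb.1 = pvAll sa.1 ∧
  (0 < sa.2.2 → sb.2.2.1 = (pvSF sa.2.1).1.map String.ofList ∧
    sb.2.2.2 = (pvSF sa.2.1).2.1 ∧ (pvSF sa.2.1).2.2 = sa.2.2 - 1) ∧
  (sa.2.2 ≤ 0 → sb.2.2.1 = [] ∧ sb.2.2.2 = [])

lemma pvSF_append_one (cur : List Char) (c : Char) :
    pvSF (cur ++ [c]) = pvSplitStep (pvSF cur) c := by
  unfold pvSF; rw [List.foldl_append]; rfl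

lemma pv_inv_step (cl : List (List Char)) (cur : List Char) (d : Int)
    (tok : List String) (t : List Char) (c : Char)
    (hpos : 0 < d → tok = (pvSF cur).1.map String.ofList ∧ t = (pvSF cur).2.1 ∧
      (pvSF cur).2.2 = d - 1)
    (hneg : d ≤ 0 → tok = [] ∧ t = []) :
    pvInv (pvStepA (cl, cur, d) c) (pvStepB (pvAll cl, d, tok, t) c) := by
  by_cases h1 : c = '('
  · subst h1
    by_cases hd0 : d = 0
    · subst hd0
      have eA : pvStepA (cl, cur, 0) '(' = (cl, [], 1) := by simp [pvStepA]
      have eB : pvStepB (pvAll cl, 0, tok, t) '(' = (pvAll cl, 1, [], []) := by simp [pvStepB]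
      rw [eA, eB]
      exact ⟨rfl, rfl, fun _ => ⟨rfl, rfl, by dsimp only; decide⟩, by dsimp only; omega⟩
    by_cases hd1 : 0 < d
    · have eA : pvStepA (cl, cur, d) '(' = (cl, cur ++ ['('], d + 1) := by
        simp [pvStepA, hd0]
      have eB : pvStepB (pvAll cl, d, tok, t) '(' = (pvAll cl, d + 1, tok, t ++ ['(']) := by
        simp [pvStepB, hd0, hd1]
      rw [eA, eB]
      obtain ⟨htok, ht, hn⟩ := hpos hd1
      rcases hsf : pvSF cur with ⟨L, T, n⟩
      rw [hsf] at htok ht hn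
      simp only at htok ht hn
      refine ⟨rfl, rfl, ?_, by dsimp only; omega⟩
      intro _
      dsimp only
      rw [pvSF_append_one, hsf]
      have estep : pvSplitStep (L, T, n) '(' = (L, T ++ ['('], n + 1) := by
        simp [pvSplitStep]
      rw [estep]
      exact ⟨htok, by rw [ht], by dsimp only; omega⟩
    · have eA : pvStepA (cl, cur, d) '(' = (cl, cur ++ ['('], d + 1) := by
        simp [pvStepA, hd0]
      have eB : pvStepB (pvAll cl, d, tok, t) '(' = (pvAll cl, d + 1, tok, t) := by
        simp [pvStepB, hd0, hd1]
      rw [eA, eB]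
      obtain ⟨htok, ht⟩ := hneg (by omega)
      exact ⟨rfl, rfl, by dsimp only; omega, fun _ => ⟨htok, ht⟩⟩
  by_cases h2 : c = ')'
  · subst h2
    by_cases hd1 : d - 1 = 0
    · -- clause flush
      have hd : d = 1 := by omega
      subst hd
      obtain ⟨htok, ht, _⟩ := hpos (by omega)
      have eA : pvStepA (cl, cur, 1) ')' = (cl ++ [PySem.Chars.strip cur], [], 0) := by
        simp [pvStepA]
      have eB : pvStepB (pvAll cl, 1, tok, t) ')' =
          (PySem.Set.add (pvAll cl) (pvFlushTok tok t), 0, [], []) := by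
        simp [pvStepB]
      rw [eA, eB]
      refine ⟨rfl, ?_, by dsimp only; omega, fun _ => ⟨rfl, rfl⟩⟩
      show PySem.Set.add (pvAll cl) (pvFlushTok tok t) = pvAll (cl ++ [PySem.Chars.strip cur])
      rw [pvAll_append, pvFlushTok_eq, htok, ht, pv_flush_eq]
      simp
    by_cases hd2 : 0 < d - 1
    · have eA : pvStepA (cl, cur, d) ')' = (cl, cur ++ [')'], d - 1) := by
        simp [pvStepA, hd1]
      have eB : pvStepB (pvAll cl, d, tok, t) ')' = (pvAll cl, d - 1, tok, t ++ [')']) := by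
        simp [pvStepB, hd1]; omega
      rw [eA, eB]
      obtain ⟨htok, ht, hn⟩ := hpos (by omega)
      rcases hsf : pvSF cur with ⟨L, T, n⟩
      rw [hsf] at htok ht hn
      simp only at htok ht hn
      refine ⟨rfl, rfl, ?_, by dsimp only; omega⟩
      intro _
      dsimp only
      rw [pvSF_append_one, hsf]
      have estep : pvSplitStep (L, T, n) ')' = (L, T ++ [')'], n - 1) := by
        simp [pvSplitStep]
      rw [estep]
      exact ⟨htok, by rw [ht], by dsimp only; omega⟩
    · have eA : pvStepA (cl, cur, d) ')' = (cl, cur ++ [')'], d - 1) := by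
        simp [pvStepA, hd1]
      have eB : pvStepB (pvAll cl, d, tok, t) ')' = (pvAll cl, d - 1, tok, t) := by
        simp [pvStepB, hd1]; omega
      rw [eA, eB]
      obtain ⟨htok, ht⟩ := hneg (by omega)
      exact ⟨rfl, rfl, by dsimp only; omega, fun _ => ⟨htok, ht⟩⟩
  -- c is neither '(' nor ')'
  by_cases hd1 : 0 < d
  · have eA : pvStepA (cl, cur, d) c = (cl, cur ++ [c], d) := by
      simp [pvStepA, h1, h2, hd1]
    rw [eA]
    obtain ⟨htok, ht, hn⟩ := hpos hd1
    rcases hsf : pvSF cur with ⟨L, T, n⟩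
    rw [hsf] at htok ht hn
    simp only at htok ht hn
    by_cases h3 : c = ',' ∧ d = 1
    · obtain ⟨rfl, rfl⟩ := h3
      have hn0 : n = 0 := by omega
      subst hn0
      have eB : pvStepB (pvAll cl, 1, tok, t) ',' =
          (pvAll cl, 1,
           (if PySem.Chars.strip t ≠ [] then tok ++ [String.ofList (PySem.Chars.strip t)]
            else tok), []) := by
        simp [pvStepB]
      rw [eB]
      refine ⟨rfl, rfl, ?_, by dsimp only; omega⟩
      intro _
      dsimp only
      rw [pvSF_append_one, hsf]
      have estep : pvSplitStep (L, T, 0) ',' =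
          (if PySem.Chars.strip T ≠ [] then L ++ [PySem.Chars.strip T] else L, [], 0) := by
        simp [pvSplitStep]
      rw [estep]
      refine ⟨?_, rfl, by dsimp only; decide⟩
      rw [htok, ht]
      split_ifs <;> simp
    · -- ordinary character (or a comma at depth ≥ 2): appended on both sides
      have eB : pvStepB (pvAll cl, d, tok, t) c = (pvAll cl, d, tok, t ++ [c]) := by
        simp [pvStepB, h1, h2, h3, hd1]
      rw [eB]
      refine ⟨rfl, rfl, ?_, by dsimp only; omega⟩
      intro _
      dsimp only
      rw [pvSF_append_one, hsf]
      by_cases hc : c = ',' ∧ n = 0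
      · exact absurd ⟨hc.1, by omega⟩ h3
      · have estep : pvSplitStep (L, T, n) c = (L, T ++ [c], n) := by
          simp [pvSplitStep, h1, h2, hc]
        rw [estep]
        exact ⟨htok, by rw [ht], by dsimp only; omega⟩
  · -- at depth ≤ 0 both sides ignore the character
    have eA : pvStepA (cl, cur, d) c = (cl, cur, d) := by
      simp [pvStepA, h1, h2, hd1]
    have eB : pvStepB (pvAll cl, d, tok, t) c = (pvAll cl, d, tok, t) := by
      have h3 : ¬ (c = ',' ∧ d = 1) := by rintro ⟨_, rfl⟩; omega
      simp [pvStepB, h1, h2, h3, hd1]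
    rw [eA, eB]
    exact ⟨rfl, rfl, hpos, hneg⟩

lemma pv_inv_fold (cs : List Char) :
    ∀ sa sb, pvInv sa sb → pvInv (List.foldl pvStepA sa cs) (List.foldl pvStepB sb cs) := by
  induction cs with
  | nil => intro sa sb h; exact h
  | cons c cs ih =>
    intro sa sb h
    rw [List.foldl_cons, List.foldl_cons]
    rcases sa with ⟨cl, cur, p⟩
    rcases sb with ⟨res, d, tok, t⟩
    obtain ⟨hd, hres, hpos, hneg⟩ := h
    simp only at hd hres hpos hneg
    subst hd hres
    exact ih _ _ (pv_inv_step cl cur _ tok t c hpos hneg)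

lemma pv_loops_eq (kb : List Char) :
    (List.foldl pvStepA ([], [], (0 : Int)) kb).1.foldl
      (fun s clause => PySem.Set.add s ((pvProcA clause).map String.ofList)) [] =
    (List.foldl pvStepB ([], (0 : Int), [], []) kb).1 := by
  have h0 : pvInv ([], [], (0 : Int)) ([], (0 : Int), [], []) := by
    refine ⟨rfl, rfl, by dsimp only; omega, fun _ => ⟨rfl, rfl⟩⟩
  have h := pv_inv_fold kb _ _ h0
  obtain ⟨_, hres, _, _⟩ := h
  rw [hres]
  rfl

-- ===== VERDICT (by name: the statement is the Claim_ definition above) =====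
theorem Parse_for_FOL_spec : Claim_equal_Parse_for_FOL := by
  intro KB _ _
  unfold Spec_Parse_for_FOL Parse_for_FOL Parse_for_FOL_alt
  have hpre : pvPreB KB = pvPreA KB := rfl
  rw [hpre]
  exact pv_loops_eq (pvPreA KB)
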